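-- pv_equiv track=rewrite | github.com/222eunji/CodeKata | 백준/Bronze/8958. OX퀴즈/OX퀴즈.py | solution
-- ===== SOURCE A (Python) =====
-- def solution(ox):
--     total_score = 0
--     score = 0
--
--     for answer in ox:
--         if answer == 'O':
--             score += 1
--             total_score += score
--         else:
--             score = 0
--     return total_score
-- ===== SOURCE B (Python) =====
-- def solution(ox):
--     total = 0
--     i = 0
--     n = len(ox)
--     while i < n:
--         if ox[i] == 'O':
--             j = i
--             while j < n and ox[j] == 'O':
--                 j += 1
--             L = j - i
--             total += L * (L + 1) // 2
--             i = j
--         else: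
--             i += 1
--     return total
-- ===== Notes on version B (the rewrite author's own statement) =====
-- stated objective: alternative
-- what changed: Replaces the per-character running-score accumulator with a run decomposition: scan to the end of each maximal 'O' run and add the triangular closed form L*(L+1)//2 per run.
import Mathlib
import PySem

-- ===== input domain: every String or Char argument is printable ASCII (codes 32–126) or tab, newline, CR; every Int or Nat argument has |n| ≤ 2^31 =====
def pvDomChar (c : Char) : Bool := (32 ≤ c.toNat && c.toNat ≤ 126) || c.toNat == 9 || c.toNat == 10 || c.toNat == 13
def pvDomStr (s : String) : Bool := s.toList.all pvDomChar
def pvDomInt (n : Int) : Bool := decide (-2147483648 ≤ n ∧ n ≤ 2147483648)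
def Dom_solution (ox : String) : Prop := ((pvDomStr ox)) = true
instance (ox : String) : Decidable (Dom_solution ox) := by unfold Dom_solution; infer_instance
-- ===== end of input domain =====

-- B replaces A's running-score accumulator by a maximal-'O'-run scan with the triangular closed form per run (alternative decomposition, same cost).

-- ===== PORT A =====
def solution (ox : String) : Int :=
  (ox.toList.foldl
    (fun (st : Int × Int) answer =>
      if answer = 'O' then (st.1 + (st.2 + 1), st.2 + 1) else (st.1, 0))
    (0, 0)).1

-- ===== PORT B =====
-- transliteration of Source B's outer while loop: each step either consumes one
-- non-'O' char, or consumes a whole maximal 'O' run (the inner while loop =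
-- takeWhile/dropWhile) and adds L*(L+1)//2.
def solutionAltGo (cs : List Char) (total : Int) : Int :=
  match cs with
  | [] => total
  | c :: rest =>
    if c = 'O' then
      let L : Int := ((c :: rest).takeWhile (fun x => x = 'O')).length
      solutionAltGo ((c :: rest).dropWhile (fun x => x = 'O'))
        (total + PySem.Int.floordiv (L * (L + 1)) 2)
    else
      solutionAltGo rest total
termination_by cs.length
decreasing_by
  · have h : (decide (c = 'O')) = true := by simpa using ‹c = 'O'›
    simp only [List.dropWhile_cons, h, if_true]
    exact Nat.lt_succ_of_le (List.length_dropWhile_le _ _)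
  · simp

def solution_alt (ox : String) : Int := solutionAltGo ox.toList 0

-- ===== PRECONDITION & SPEC =====
def Spec_solution (ox : String) (out : Int) : Prop := out = solution_alt ox
instance (ox : String) (out : Int) : Decidable (Spec_solution ox out) := by unfold Spec_solution; infer_instance

-- ===== CLAIM (what is proved, stated in full; the proofs are below) =====
def Claim_equal_solution : Prop := ∀ (ox : String), Dom_solution ox → Spec_solution ox (solution ox)

-- ===== LEMMAS AND PROOFS =====

-- contribution of the tail when the running score is s
def phi (s : Int) : List Char → Int
  | [] => 0
  | c :: rest => if c = 'O' then (s + 1) + phi (s + 1) rest else phi 0 rest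

theorem foldA_eq_phi (cs : List Char) (t s : Int) :
    (cs.foldl
      (fun (st : Int × Int) answer =>
        if answer = 'O' then (st.1 + (st.2 + 1), st.2 + 1) else (st.1, 0))
      (t, s)).1 = t + phi s cs := by
  induction cs generalizing t s with
  | nil => simp [phi]
  | cons c rest ih =>
    by_cases h : c = 'O' <;> simp [phi, h, ih, add_assoc]

theorem tri_step (a : Int) : (a + 1) * (a + 2) / 2 = a * (a + 1) / 2 + (a + 1) := by
  have h : (a + 1) * (a + 2) = a * (a + 1) + (a + 1) * 2 := by ring
  rw [h, Int.add_mul_ediv_right _ _ (by norm_num : (2:Int) ≠ 0)]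

theorem phi_run (cs : List Char) (s : Int) :
    phi s cs =
      s * ((cs.takeWhile (fun x => x = 'O')).length : Int)
      + ((cs.takeWhile (fun x => x = 'O')).length : Int) * (((cs.takeWhile (fun x => x = 'O')).length : Int) + 1) / 2
      + phi 0 (cs.dropWhile (fun x => x = 'O')) := by
  induction cs generalizing s with
  | nil => simp [phi]
  | cons c rest ih =>
    by_cases h : c = 'O'
    · simp only [phi, List.takeWhile_cons, List.dropWhile_cons,
        decide_eq_true_eq, if_pos h, List.length_cons]
      rw [ih (s + 1)]
      set k : Int := ((rest.takeWhile (fun x => x = 'O')).length : Int) with hk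
      have hcast : ((rest.takeWhile (fun x => x = 'O')).length + 1 : Nat) = (k + 1 : Int) := by
        push_cast [hk]; ring
      rw [hcast]
      rw [show (k + 1) * (k + 1 + 1) = (k + 1) * (k + 2) by ring]
      have h1 := tri_step k
      have h2 : (s + 1) * k = s * k + k := by ring
      have h3 : s * (k + 1) = s * k + s := by ring
      linarith
    · simp [phi, h]

theorem floordiv_eq (x : Int) : PySem.Int.floordiv x 2 = x / 2 :=
  PySem.Int.floordiv_eq_ediv_of_pos (by norm_num)

theorem go_eq_phi (cs : List Char) (t : Int) : solutionAltGo cs t = t + phi 0 cs := by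
  induction cs, t using solutionAltGo.induct with
  | case1 t => simp [solutionAltGo, phi]
  | case2 total rest L ih =>
    rw [solutionAltGo, if_pos rfl, ih, floordiv_eq]
    have h := phi_run ('O' :: rest) 0
    simp only [zero_mul, zero_add] at h
    rw [h]
    ring
  | case3 total c rest hc ih =>
    rw [solutionAltGo, if_neg hc, ih]
    simp [phi, hc]

-- ===== VERDICT (by name: the statement is the Claim_ definition above) =====
theorem solution_spec : Claim_equal_solution := by
  intro ox _
  unfold Spec_solution solution solution_alt
  rw [foldA_eq_phi, go_eq_phi]
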